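-- pv_equiv track=rewrite | github.com/k-r-1/coding-test | 프로그래머스/0/181893. 배열 조각하기/배열 조각하기.py | solution
-- ===== SOURCE A (Python) =====
-- def solution(arr, query):
--     answer = []
--     for i, v in enumerate(query):
--         if i % 2 == 0:
--             arr = arr[:query[i] + 1]
--         else:
--             arr= arr[query[i]:]
--     return arr
-- ===== SOURCE B (Python) =====
-- def solution(arr, query):
--     # Track [lo, hi) index bounds over the original array; one final slice.
--     lo, hi = 0, len(arr)
--     for i, q in enumerate(query):
--         m = hi - lo
--         j = q + 1 if i % 2 == 0 else q
--         if j < 0: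
--             j += m
--         j = max(0, min(j, m))
--         if i % 2 == 0:
--             hi = lo + j
--         else:
--             lo += j
--     return arr[lo:hi]
-- ===== Notes on version B (the rewrite author's own statement) =====
-- stated objective: alternative
-- what changed: Instead of materialising a new list slice for every query, B folds each query into a pair of [lo, hi) index bounds over the original array (Python slice-clamping done arithmetically) and takes a single slice at the end; it trades A's repeated list copies for O(1) bookkeeping per query.
import Mathlib
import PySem

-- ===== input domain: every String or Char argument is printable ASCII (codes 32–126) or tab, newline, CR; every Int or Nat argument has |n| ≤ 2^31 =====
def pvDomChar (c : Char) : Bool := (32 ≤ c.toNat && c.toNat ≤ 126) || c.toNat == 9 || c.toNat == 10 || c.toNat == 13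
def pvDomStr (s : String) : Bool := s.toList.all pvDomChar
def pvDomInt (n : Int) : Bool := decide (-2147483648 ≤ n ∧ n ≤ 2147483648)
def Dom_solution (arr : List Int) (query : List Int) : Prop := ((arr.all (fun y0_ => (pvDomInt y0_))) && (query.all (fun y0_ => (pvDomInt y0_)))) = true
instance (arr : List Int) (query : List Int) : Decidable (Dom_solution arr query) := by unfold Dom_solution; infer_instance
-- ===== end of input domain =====

-- B replaces A's per-query list slicing by folding the queries into [lo, hi) index
-- bounds over the original array, with one final slice (objective: alternative).

-- ===== PORT A =====
def solution (arr : List Int) (query : List Int) : List Int :=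
  (PySem.List.enumerate query).foldl
    (fun a p =>
      if PySem.Int.mod p.1 2 = 0 then
        PySem.List.slice a none (some (PySem.List.pyGetD query p.1 0 + 1))
      else
        PySem.List.slice a (some (PySem.List.pyGetD query p.1 0)) none)
    arr

-- ===== PORT B =====
-- Python slice-index clamping, done arithmetically (Source B's `if j < 0: j += m; j = max(0, min(j, m))`)
def pyClamp (m j : Int) : Int :=
  max 0 (min (if j < 0 then j + m else j) m)

def stepB (st : Int × Int) (p : Int × Int) : Int × Int :=
  let m := st.2 - st.1
  let j := pyClamp m (if PySem.Int.mod p.1 2 = 0 then p.2 + 1 else p.2)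
  if PySem.Int.mod p.1 2 = 0 then (st.1, st.1 + j) else (st.1 + j, st.2)

def solution_alt (arr : List Int) (query : List Int) : List Int :=
  let st := (PySem.List.enumerate query).foldl stepB (0, (arr.length : Int))
  PySem.List.slice arr (some st.1) (some st.2)

-- ===== PRECONDITION & SPEC =====
def Spec_solution (arr : List Int) (query : List Int) (out : List Int) : Prop := out = solution_alt arr query
instance (arr : List Int) (query : List Int) (out : List Int) : Decidable (Spec_solution arr query out) := by unfold Spec_solution; infer_instance

-- ===== CLAIM (what is proved, stated in full; the proofs are below) =====
def Claim_equal_solution : Prop := ∀ (arr : List Int) (query : List Int), Dom_solution arr query → Spec_solution arr query (solution arr query)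

-- ===== LEMMAS AND PROOFS =====

-- A's step, with the (provably equal) enumerate value p.2 in place of the lookup query[p.1]
def stepA (a : List Int) (p : Int × Int) : List Int :=
  if PySem.Int.mod p.1 2 = 0 then
    PySem.List.slice a none (some (p.2 + 1))
  else
    PySem.List.slice a (some p.2) none

-- enumerate xs s pairs each element with its (shifted) index into xs
lemma enumerate_index (xs : List Int) : ∀ (s : Int), 0 ≤ s →
    ∀ p ∈ PySem.List.enumerate xs s, ∃ k : Nat, p.1 = s + k ∧ xs[k]? = some p.2 := by
  induction xs with
  | nil => intro s _ p hp; simp [PySem.List.enumerate] at hp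
  | cons x t ih =>
    intro s hs p hp
    simp only [PySem.List.enumerate, List.mem_cons] at hp
    rcases hp with h | h
    · exact ⟨0, by simp [h]⟩
    · obtain ⟨k, hk1, hk2⟩ := ih (s + 1) (by omega) p h
      exact ⟨k + 1, by push_cast; omega, by simpa using hk2⟩

lemma foldA_eq_stepA (arr query : List Int) :
    solution arr query = (PySem.List.enumerate query).foldl stepA arr := by
  unfold solution
  apply PySem.List.foldl_congr_mem
  intro acc p hp
  obtain ⟨k, hk1, hk2⟩ := enumerate_index query 0 le_rfl p hp
  have hget : PySem.List.pyGetD query p.1 0 = p.2 := by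
    rw [hk1]; simp only [zero_add, PySem.List.pyGetD_natCast]
    simp [List.getD, hk2]
  rw [stepA, hget]

-- the clamped Nat slice index equals B's Int clamp
lemma clampIdx_eq_pyClamp (n : Nat) (e : Int) :
    (PySem.List.clampIdx n e : Int) = pyClamp (n : Int) e := by
  unfold PySem.List.clampIdx pyClamp; split_ifs <;> omega

-- the segment of arr from index a, of length k
def seg (arr : List Int) (a k : Nat) : List Int := (arr.drop a).take k

lemma length_seg (arr : List Int) (a k : Nat) (h : a + k ≤ arr.length) :
    (seg arr a k).length = k := by
  simp [seg]; omega

lemma slice_seg_take (arr : List Int) (a k : Nat) (h : a + k ≤ arr.length) (e : Int) :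
    PySem.List.slice (seg arr a k) none (some e) = seg arr a (PySem.List.clampIdx k e) := by
  have hle := PySem.List.clampIdx_le k e
  have hlen := length_seg arr a k h
  simp only [PySem.List.slice, List.drop_zero, Nat.sub_zero, hlen]
  rw [seg, List.take_take, seg]
  congr 1
  omega

lemma slice_seg_drop (arr : List Int) (a k : Nat) (h : a + k ≤ arr.length) (s : Int) :
    PySem.List.slice (seg arr a k) (some s) none
      = seg arr (a + PySem.List.clampIdx k s) (k - PySem.List.clampIdx k s) := by
  have hle := PySem.List.clampIdx_le k s
  rw [PySem.List.slice_some_none, length_seg arr a k h]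
  rw [seg, List.drop_take, List.drop_drop, seg]

-- main invariant: A's fold over the segment is B's fold over the bounds
lemma fold_inv (arr : List Int) : ∀ (ps : List (Int × Int)) (a k : Nat),
    a + k ≤ arr.length →
    ∃ a' k' : Nat, a' + k' ≤ arr.length ∧
      ps.foldl stepB ((a : Int), (a : Int) + (k : Int)) = ((a' : Int), (a' : Int) + (k' : Int)) ∧
      ps.foldl stepA (seg arr a k) = seg arr a' k' := by
  intro ps
  induction ps with
  | nil => intro a k h; exact ⟨a, k, h, rfl, rfl⟩
  | cons p t ih =>
    intro a k h
    simp only [List.foldl_cons]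
    by_cases hpar : PySem.Int.mod p.1 2 = 0
    · have hstB : stepB ((a : Int), (a : Int) + (k : Int)) p
          = ((a : Int), (a : Int) + (PySem.List.clampIdx k (p.2 + 1) : Nat)) := by
        simp only [stepB, if_pos hpar]
        rw [clampIdx_eq_pyClamp]
        norm_num
      have hstA : stepA (seg arr a k) p = seg arr a (PySem.List.clampIdx k (p.2 + 1)) := by
        simp only [stepA, if_pos hpar]
        exact slice_seg_take arr a k h _
      rw [hstB, hstA]
      exact ih a (PySem.List.clampIdx k (p.2 + 1))
        (by have := PySem.List.clampIdx_le k (p.2 + 1); omega)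
    · have hle := PySem.List.clampIdx_le k p.2
      have hstB : stepB ((a : Int), (a : Int) + (k : Int)) p
          = (((a + PySem.List.clampIdx k p.2 : Nat) : Int),
             ((a + PySem.List.clampIdx k p.2 : Nat) : Int) + ((k - PySem.List.clampIdx k p.2 : Nat) : Int)) := by
        simp only [stepB, if_neg hpar]
        have hm : ((a : Int) + k - a) = (k : Int) := by ring
        push_cast [Nat.cast_sub hle]
        rw [hm, clampIdx_eq_pyClamp]
        exact Prod.ext rfl (by ring)
      have hstA : stepA (seg arr a k) p
          = seg arr (a + PySem.List.clampIdx k p.2) (k - PySem.List.clampIdx k p.2) := by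
        simp only [stepA, if_neg hpar]
        exact slice_seg_drop arr a k h _
      rw [hstB, hstA]
      exact ih _ _ (by omega)

-- ===== VERDICT (by name: the statement is the Claim_ definition above) =====
theorem solution_spec : Claim_equal_solution := by
  intro arr query _
  unfold Spec_solution solution_alt
  obtain ⟨a', k', hle, hB, hA⟩ := fold_inv arr (PySem.List.enumerate query) 0 arr.length (by omega)
  simp only [Nat.cast_zero, zero_add] at hB
  have h0 : seg arr 0 arr.length = arr := by simp [seg]
  rw [h0] at hA
  rw [foldA_eq_stepA, hA]
  simp only [hB]
  exact (PySem.List.slice_natCast_add arr a' k').symm
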